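-- pv_equiv track=rewrite | github.com/Morgassa/Code_Wars | (6 kyu) A Rule of Divisibility by 13.py | thirt
-- ===== SOURCE A (Python) =====
-- def thirt(n):
--     pattern = [1, 10, 9, 12, 3, 4]
--     soma = 0
--
--     while True:
--         current_soma = 0
--         # enumerate(str(n)[::-1] serve para inverter a ordem das strings em 'n'.
--         for index, digit in enumerate(str(n)[::-1]):
--             # Aqui é feita a coreelação da posição do valor em 'n' com seu respectivo par em pattern.
--             # Por se tratar de um padrão o valor do index dever correr dentro da 'pattern' repetidas vezes
--             # para isso dividimos o index pelo comprimento total da string 'pattern'.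
--             current_index = index % len(pattern)
--             # Já sabendo o valor correspondente dentro de 'pattern' podemos fazer a multiplicação e soma-las.
--             current_soma += int(digit) * pattern[current_index]
--         # Se a soma não for iguql a 'n' o estrutura toda se repete.
--         if soma == current_soma:
--             return soma
--
--         soma = current_soma
--         n = current_soma
-- ===== SOURCE B (Python) =====
-- def thirt(n):
--     weights = [1, 10, 9, 12, 3, 4]
--     r, m, i = 0, n, 0
--     while m > 0:
--         r += m % 10 * weights[i % 6]
--         m //= 10
--         i += 1
--     return r if r == n else thirt(r)
-- ===== Notes on version B (the rewrite author's own statement) =====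
-- stated objective: alternative
-- what changed: B extracts the weighted digits arithmetically with divmod instead of converting n to a string each pass, and replaces the while-loop with its previous-sum accumulator by direct recursion that stops when one pass returns its own input.
import Mathlib
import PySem

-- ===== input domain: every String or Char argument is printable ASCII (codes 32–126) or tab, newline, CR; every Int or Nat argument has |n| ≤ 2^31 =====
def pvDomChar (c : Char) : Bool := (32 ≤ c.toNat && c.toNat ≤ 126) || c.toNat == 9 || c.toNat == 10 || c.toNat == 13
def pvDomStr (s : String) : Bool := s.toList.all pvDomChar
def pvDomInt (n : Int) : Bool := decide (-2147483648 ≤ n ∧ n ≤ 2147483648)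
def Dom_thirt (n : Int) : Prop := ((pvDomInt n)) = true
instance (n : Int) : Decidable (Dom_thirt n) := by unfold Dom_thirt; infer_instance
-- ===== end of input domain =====

-- B replaces per-pass str(n) digit extraction by arithmetic divmod and the while-loop with its
-- previous-sum accumulator by direct recursion on the fixed point; agrees with A on n ≥ 0
-- (A raises ValueError on n < 0).

-- ===== PORT A =====
-- Source A: pattern = [1, 10, 9, 12, 3, 4]
def Apattern : List Int := [1, 10, 9, 12, 3, 4]

-- Source A, inner loop body: current_soma += int(digit) * pattern[index % len(pattern)]
-- (Option accumulator: none exactly where int(digit) raises ValueError)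
def Astep (acc : Option Int) (p : Int × Char) : Option Int :=
  acc.bind fun s => (PySem.Int.ofChars? [p.2]).map fun d =>
    s + d * PySem.List.pyGetD Apattern (PySem.Int.mod p.1 (Apattern.length : Int)) 0

-- Source A: one pass of 'for index, digit in enumerate(str(n)[::-1])'; str(n) is PySem.Int.toChars
-- (toList_toStr) and s[::-1] is reverse (PySem.Str.slice?_none_none_neg_one).
def Apass (n : Int) : Option Int :=
  (PySem.List.enumerate ((PySem.Int.toChars n).reverse) 0).foldl Astep (some 0)

-- Source A: while True: current_soma = <pass>; if soma == current_soma: return soma; soma = n = current_soma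
-- (the fuel argument is only a totality guard; thirt hands it enough fuel for every input,
-- proved in fuel lemmas below the claim block)
def thirtLoopF : Nat → Int → Int → Int
  | 0, _, _ => 0
  | f + 1, soma, n =>
    let cs := (Apass n).getD 0
    if soma = cs then soma else thirtLoopF f cs cs

def thirt (n : Int) : Int := thirtLoopF (n.toNat + 2) 0 n

-- ===== PORT B =====
-- Source B: weights = [1, 10, 9, 12, 3, 4]
def Bweights : List Int := [1, 10, 9, 12, 3, 4]

-- (termination fact for the digit loop, cited by name from `decreasing_by`)
theorem wgo_dec {m : Int} (h : ¬ m ≤ 0) : (PySem.Int.floordiv m 10).toNat < m.toNat := by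
  rw [PySem.Int.floordiv_eq_ediv_of_pos (by norm_num)]; omega

-- Source B: while m > 0: r += m % 10 * weights[i % 6]; m //= 10; i += 1
def wgo (m i r : Int) : Int :=
  if _h : m ≤ 0 then r
  else wgo (PySem.Int.floordiv m 10) (i + 1)
    (r + PySem.Int.mod m 10 * PySem.List.pyGetD Bweights (PySem.Int.mod i (Bweights.length : Int)) 0)
termination_by m.toNat
decreasing_by
  exact wgo_dec _h

-- Source B: return r if r == n else thirt(r)   (fuel is only a totality guard, as in port A)
def thirtAltF : Nat → Int → Int
  | 0, _ => 0
  | f + 1, n =>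
    let r := wgo n 0 0
    if r = n then r else thirtAltF f r

def thirt_alt (n : Int) : Int := thirtAltF (n.toNat + 2) n

-- ===== PRECONDITION & SPEC =====
-- Pre_ excludes exactly n < 0, where A raises ValueError (int('-') on the reversed sign character).
def Pre_thirt (n : Int) : Prop := 0 ≤ n
instance (n : Int) : Decidable (Pre_thirt n) := by unfold Pre_thirt; infer_instance
def pvWitness_thirt : Int := 1234

def Spec_thirt (n : Int) (out : Int) : Prop := out = thirt_alt n
instance (n : Int) (out : Int) : Decidable (Spec_thirt n out) := by unfold Spec_thirt; infer_instance

-- ===== CLAIM (what is proved, stated in full; the proofs are below) =====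
def Claim_equal_thirt : Prop := ∀ (n : Int), Dom_thirt n → Pre_thirt n → Spec_thirt n (thirt n)

-- ===== LEMMAS AND PROOFS =====
lemma wgo_nonpos {m : Int} (i r : Int) (h : m ≤ 0) : wgo m i r = r := by
  rw [wgo, dif_pos h]

lemma wgo_pos {m : Int} (i r : Int) (h : ¬ m ≤ 0) :
    wgo m i r = wgo (PySem.Int.floordiv m 10) (i + 1)
      (r + PySem.Int.mod m 10 * PySem.List.pyGetD Bweights (PySem.Int.mod i (Bweights.length : Int)) 0) := by
  rw [wgo, dif_neg h]

lemma weight_bounds (i : Int) :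
    1 ≤ PySem.List.pyGetD Bweights (PySem.Int.mod i (Bweights.length : Int)) 0 ∧
    PySem.List.pyGetD Bweights (PySem.Int.mod i (Bweights.length : Int)) 0 ≤ 12 := by
  have h6 : ((Bweights.length : Int)) = 6 := by decide
  rw [h6]
  have h0 : 0 ≤ PySem.Int.mod i 6 := PySem.Int.mod_nonneg i (by norm_num)
  have h1 : PySem.Int.mod i 6 < 6 := PySem.Int.mod_lt i (by norm_num)
  set j := PySem.Int.mod i 6 with hj
  interval_cases j <;> decide

lemma wgo_acc_aux : ∀ (t : Nat) (m i r : Int), m.toNat ≤ t → wgo m i r = r + wgo m i 0 := by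
  intro t
  induction t with
  | zero =>
    intro m i r h
    have hm : m ≤ 0 := by omega
    rw [wgo_nonpos i r hm, wgo_nonpos i 0 hm]; ring
  | succ t ih =>
    intro m i r h
    by_cases hm : m ≤ 0
    · rw [wgo_nonpos i r hm, wgo_nonpos i 0 hm]; ring
    · have hq : (PySem.Int.floordiv m 10).toNat ≤ t := by
        rw [PySem.Int.floordiv_eq_ediv_of_pos (by norm_num)]; omega
      rw [wgo_pos i r hm, wgo_pos i 0 hm,
          ih (PySem.Int.floordiv m 10) (i + 1)
            (r + PySem.Int.mod m 10 * PySem.List.pyGetD Bweights (PySem.Int.mod i (Bweights.length : Int)) 0) hq,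
          ih (PySem.Int.floordiv m 10) (i + 1)
            (0 + PySem.Int.mod m 10 * PySem.List.pyGetD Bweights (PySem.Int.mod i (Bweights.length : Int)) 0) hq]
      ring

lemma wgo_acc (m i r : Int) : wgo m i r = r + wgo m i 0 :=
  wgo_acc_aux m.toNat m i r le_rfl

lemma wgo_bounds_aux : ∀ (t : Nat) (m i : Int), m.toNat ≤ t → 0 ≤ m →
    0 ≤ wgo m i 0 ∧ wgo m i 0 ≤ 12 * m := by
  intro t
  induction t with
  | zero =>
    intro m i h h0
    have hm : m = 0 := by omega
    subst hm
    rw [wgo_nonpos i 0 le_rfl]; norm_num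
  | succ t ih =>
    intro m i h h0
    by_cases hm : m ≤ 0
    · have hm0 : m = 0 := le_antisymm hm h0
      subst hm0
      rw [wgo_nonpos i 0 le_rfl]; norm_num
    · rw [wgo_pos i 0 hm,
          wgo_acc (PySem.Int.floordiv m 10) (i + 1)
            (0 + PySem.Int.mod m 10 * PySem.List.pyGetD Bweights (PySem.Int.mod i (Bweights.length : Int)) 0)]
      rw [PySem.Int.floordiv_eq_ediv_of_pos (by norm_num),
          PySem.Int.mod_eq_emod_of_pos (by norm_num)]
      have hq : (m / 10).toNat ≤ t := by omega
      have hq0 : 0 ≤ m / 10 := by omega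
      obtain ⟨hY0, hY1⟩ := ih (m / 10) (i + 1) hq hq0
      obtain ⟨hw0, hw1⟩ := weight_bounds i
      have hd0 : 0 ≤ m % 10 := by omega
      set w := PySem.List.pyGetD Bweights (PySem.Int.mod i (Bweights.length : Int)) 0 with hw
      have hp0 : 0 ≤ m % 10 * w := mul_nonneg hd0 (by omega)
      have hp1 : m % 10 * w ≤ m % 10 * 12 := mul_le_mul_of_nonneg_left hw1 hd0
      constructor <;> omega

lemma wgo_bounds (m i : Int) (h0 : 0 ≤ m) : 0 ≤ wgo m i 0 ∧ wgo m i 0 ≤ 12 * m :=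
  wgo_bounds_aux m.toNat m i le_rfl h0

lemma wgo_split100 (m : Int) (h0 : 0 ≤ m) :
    wgo m 0 0 = PySem.Int.mod m 100 + wgo (PySem.Int.floordiv m 100) 2 0 := by
  rw [PySem.Int.floordiv_eq_ediv_of_pos (by norm_num : (0:Int) < 100),
      PySem.Int.mod_eq_emod_of_pos (by norm_num : (0:Int) < 100)]
  by_cases hm : m ≤ 0
  · have : m = 0 := le_antisymm hm h0
    subst this
    rw [wgo_nonpos 0 0 le_rfl, wgo_nonpos 2 0 (by norm_num)]; norm_num
  · have hw0 : PySem.List.pyGetD Bweights (PySem.Int.mod 0 (Bweights.length : Int)) 0 = 1 := by decide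
    rw [wgo_pos 0 0 hm, hw0,
        wgo_acc (PySem.Int.floordiv m 10) (0 + 1) (0 + PySem.Int.mod m 10 * 1)]
    rw [PySem.Int.floordiv_eq_ediv_of_pos (by norm_num : (0:Int) < 10),
        PySem.Int.mod_eq_emod_of_pos (by norm_num : (0:Int) < 10)]
    by_cases hq : m / 10 ≤ 0
    · rw [wgo_nonpos (0 + 1) 0 hq]
      have h100 : m / 100 = 0 := by omega
      rw [h100, wgo_nonpos 2 0 le_rfl]
      omega
    · have hw1 : PySem.List.pyGetD Bweights (PySem.Int.mod (0 + 1) (Bweights.length : Int)) 0 = 10 := by decide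
      rw [wgo_pos (0 + 1) 0 hq, hw1,
          wgo_acc (PySem.Int.floordiv (m / 10) 10) (0 + 1 + 1)
            (0 + PySem.Int.mod (m / 10) 10 * 10)]
      rw [PySem.Int.floordiv_eq_ediv_of_pos (by norm_num : (0:Int) < 10),
          PySem.Int.mod_eq_emod_of_pos (by norm_num : (0:Int) < 10)]
      have h1 : m / 10 / 10 = m / 100 := by omega
      have h2 : (0 : Int) + 1 + 1 = 2 := by norm_num
      rw [h1, h2]
      omega

lemma wsum_zero : wgo 0 0 0 = 0 := wgo_nonpos 0 0 le_rfl

lemma wsum_fix {n : Int} (h0 : 0 ≤ n) (h : n < 100) : wgo n 0 0 = n := by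
  rw [wgo_split100 n h0]
  have hq : PySem.Int.floordiv n 100 = 0 := by
    rw [PySem.Int.floordiv_eq_ediv_of_pos (by norm_num)]; omega
  have hr : PySem.Int.mod n 100 = n := by
    rw [PySem.Int.mod_eq_emod_of_pos (by norm_num)]; omega
  rw [hq, hr, wgo_nonpos 2 0 le_rfl]; ring

lemma wsum_lt {n : Int} (h : 100 ≤ n) : wgo n 0 0 < n := by
  rw [wgo_split100 n (by omega)]
  have hq0 : 0 ≤ PySem.Int.floordiv n 100 := by
    rw [PySem.Int.floordiv_eq_ediv_of_pos (by norm_num)]; omega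
  obtain ⟨hY0, hY1⟩ := wgo_bounds (PySem.Int.floordiv n 100) 2 hq0
  have hr0 : 0 ≤ PySem.Int.mod n 100 := PySem.Int.mod_nonneg n (by norm_num)
  have hr1 : PySem.Int.mod n 100 < 100 := PySem.Int.mod_lt n (by norm_num)
  have hdm : PySem.Int.floordiv n 100 * 100 + PySem.Int.mod n 100 = n :=
    PySem.Int.floordiv_mul_add_mod n 100
  have hq1 : 1 ≤ PySem.Int.floordiv n 100 := by nlinarith
  nlinarith

lemma wsum_nonneg {n : Int} (h0 : 0 ≤ n) : 0 ≤ wgo n 0 0 := (wgo_bounds n 0 h0).1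


-- (proof helper for the bridge: the digit characters of a Nat, big-endian)
theorem chars10_dec {k : Nat} (h : ¬ k < 10) : k / 10 < k := by omega

def chars10 (k : Nat) : List Char :=
  if _h : k < 10 then [Nat.digitChar k]
  else chars10 (k / 10) ++ [Nat.digitChar (k % 10)]
termination_by k
decreasing_by exact chars10_dec _h

lemma toDigitsCore_eq_chars10 : ∀ (f k : Nat) (acc : List Char), k < f →
    Nat.toDigitsCore 10 f k acc = chars10 k ++ acc := by
  intro f
  induction f with
  | zero => omega
  | succ f ih =>
    intro k acc h
    rw [Nat.toDigitsCore]
    by_cases h10 : k / 10 = 0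
    · have hk : k < 10 := by omega
      have hkm : k % 10 = k := by omega
      simp [h10, chars10, hk, hkm]
    · rw [if_neg h10, ih _ _ (by omega)]
      conv_rhs => rw [chars10]
      rw [dif_neg (by omega)]
      simp

lemma toChars_of_nonneg {n : Int} (h : 0 ≤ n) : PySem.Int.toChars n = chars10 n.toNat := by
  rw [PySem.Int.toChars, if_neg (by omega), Nat.toDigits,
      toDigitsCore_eq_chars10 _ _ _ (Nat.lt_succ_self _)]
  simp

lemma ofChars?_digitChar {d : Nat} (h : d < 10) :
    PySem.Int.ofChars? [Nat.digitChar d] = some (d : Int) := by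
  interval_cases d <;> decide

lemma fold_chars10 : ∀ (k i : Nat) (s : Int),
    (PySem.List.enumerate (chars10 k).reverse (i : Int)).foldl Astep (some s)
      = some (wgo (k : Int) (i : Int) s) := by
  intro k
  induction k using Nat.strong_induction_on with
  | _ k ih =>
    intro i s
    by_cases hk : k < 10
    · rw [chars10, dif_pos hk]
      rw [List.reverse_singleton, PySem.List.enumerate_cons, PySem.List.enumerate_nil]
      simp only [List.foldl_cons, List.foldl_nil, Astep, ofChars?_digitChar hk,
        Option.bind_some, Option.map_some]
      by_cases hk0 : k = 0
      · subst hk0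
        simp only [Nat.cast_zero]
        rw [wgo_nonpos _ _ le_rfl]
        norm_num
      · have hm : PySem.Int.mod (k : Int) 10 = (k : Int) := by
          rw [PySem.Int.mod_eq_emod_of_pos (by norm_num)]; omega
        have hq : PySem.Int.floordiv (k : Int) 10 ≤ 0 := by
          rw [PySem.Int.floordiv_eq_ediv_of_pos (by norm_num)]; omega
        rw [wgo_pos _ _ (by omega : ¬ (k : Int) ≤ 0), wgo_nonpos _ _ hq, hm]
        norm_num [Apattern, Bweights]
    · rw [chars10, dif_neg hk, List.reverse_append, List.reverse_singleton,
        List.singleton_append, PySem.List.enumerate_cons]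
      simp only [List.foldl_cons, Astep, ofChars?_digitChar (Nat.mod_lt k (by omega) : k % 10 < 10),
        Option.bind_some, Option.map_some]
      have hcast : ((i : Int) + 1) = ((i + 1 : Nat) : Int) := by push_cast; ring
      rw [hcast, ih (k / 10) (by omega) (i + 1)]
      have h1 : PySem.Int.floordiv (k : Int) 10 = ((k / 10 : Nat) : Int) := by
        rw [PySem.Int.floordiv_eq_ediv_of_pos (by norm_num)]; omega
      have h2 : PySem.Int.mod (k : Int) 10 = ((k % 10 : Nat) : Int) := by
        rw [PySem.Int.mod_eq_emod_of_pos (by norm_num)]; omega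
      rw [wgo_pos _ _ (by omega : ¬ (k : Int) ≤ 0), h1, h2, ← hcast]
      norm_num [Apattern, Bweights]

lemma Apass_eq {n : Int} (h : 0 ≤ n) : Apass n = some (wgo n 0 0) := by
  rw [Apass, toChars_of_nonneg h]
  have := fold_chars10 n.toNat 0 0
  rw [Int.toNat_of_nonneg h] at this
  simpa using this


lemma thirtLoopF_succ (f : Nat) (soma n : Int) :
    thirtLoopF (f + 1) soma n
      = if soma = (Apass n).getD 0 then soma
        else thirtLoopF f ((Apass n).getD 0) ((Apass n).getD 0) := rfl

lemma thirtAltF_succ (f : Nat) (n : Int) :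
    thirtAltF (f + 1) n = if wgo n 0 0 = n then wgo n 0 0 else thirtAltF f (wgo n 0 0) := rfl

-- fuel lemmas: r := wgo n 0 0 is a fixed point for 0 ≤ n < 100, strictly smaller for 100 ≤ n,
-- so n.toNat + 2 fuel always suffices.
lemma main_fuel : ∀ (f : Nat) (m : Int), 0 ≤ m → m.toNat + 2 ≤ f → ∀ (g : Nat), m.toNat + 2 ≤ g →
    thirtLoopF f m m = thirtAltF g m := by
  intro f
  induction f with
  | zero => intro m _ h; omega
  | succ f ih =>
    intro m h0 hf g hg
    obtain ⟨g', rfl⟩ : ∃ g', g = g' + 1 := ⟨g - 1, by omega⟩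
    rw [thirtLoopF_succ, thirtAltF_succ]
    simp only [Apass_eq h0, Option.getD_some]
    by_cases hr : wgo m 0 0 = m
    · simp [hr]
    · rw [if_neg (by omega : ¬ m = wgo m 0 0), if_neg hr]
      have h100 : 100 ≤ m := by
        by_contra hc
        exact hr (wsum_fix h0 (by omega))
      have hlt := wsum_lt h100
      have hge := wsum_nonneg h0
      exact ih (wgo m 0 0) hge (by omega) g' (by omega)

lemma thirtAltF_zero {g : Nat} (h : 1 ≤ g) : thirtAltF g 0 = 0 := by
  obtain ⟨g', rfl⟩ : ∃ g', g = g' + 1 := ⟨g - 1, by omega⟩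
  rw [thirtAltF_succ]
  simp [wsum_zero]

-- ===== VERDICT (by name: the statement is the Claim_ definition above) =====
theorem thirt_spec : Claim_equal_thirt := by
  intro n _ hpre
  unfold Spec_thirt thirt thirt_alt
  rw [show n.toNat + 2 = (n.toNat + 1) + 1 from rfl, thirtLoopF_succ, thirtAltF_succ]
  simp only [Apass_eq hpre, Option.getD_some]
  by_cases h0 : (0 : Int) = wgo n 0 0
  · rw [if_pos h0]
    by_cases hr : wgo n 0 0 = n
    · rw [if_pos hr]; omega
    · rw [if_neg hr, ← h0, thirtAltF_zero (by omega)]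
  · rw [if_neg h0]
    by_cases hr : wgo n 0 0 = n
    · rw [if_pos hr, hr, thirtLoopF_succ]
      simp only [Apass_eq hpre, Option.getD_some]
      rw [if_pos hr.symm]
    · rw [if_neg hr]
      have h100 : 100 ≤ n := by
        by_contra hc
        exact hr (wsum_fix hpre (by omega))
      have hlt := wsum_lt h100
      have hge := wsum_nonneg hpre
      exact main_fuel (n.toNat + 1) (wgo n 0 0) hge (by omega) (n.toNat + 1) (by omega)
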